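-- pv_equiv track=rewrite | github.com/SiddharajShirke/nlp-mongodb-interface | nlp_service/parser.py | _find_multi_word_field
-- ===== SOURCE A (Python) =====
-- from typing import Dict, Any, List, Optional, Tuple
--
-- def _normalize_singular(word: str) -> str:
--     """Naive singular form: strips trailing 's' / 'es'."""
--     w = word.lower()
--     if w.endswith("ies") and len(w) > 3:
--         return w[:-3] + "y"
--     if w.endswith("ses") or w.endswith("xes") or w.endswith("zes"):
--         return w[:-2]
--     if w.endswith("s") and not w.endswith("ss") and len(w) > 2:
--         return w[:-1]
--     return w
--
-- def _find_multi_word_field(words: List[str], start_idx: int, fields: List[str]) -> Optional[str]: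
--     """Try to match dot-notation fields using consecutive words.
--
--     Example: ``address city`` → ``address.city``
--
--     Also handles singular/plural variations:
--     ``award tech`` → ``awards.tech``
--
--     Prefers the longest (most specific) match.
--     """
--     best_match: Optional[str] = None
--     best_length = 0
--
--     for field in fields:
--         if "." not in field:
--             continue
--         segments = field.lower().split(".")
--         num_segments = len(segments)
--         if start_idx + num_segments > len(words):
--             continue
--         if num_segments <= best_length:
--             continue  # already have a longer/equal match
--         candidate = words[start_idx:start_idx + num_segments]
--
--         # Exact segment match
--         if candidate == segments:
--             best_match = field
--             best_length = num_segments
--             continue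
--
--         # Singular/plural normalized match
--         if all(
--             _normalize_singular(c) == _normalize_singular(s)
--             for c, s in zip(candidate, segments)
--         ):
--             best_match = field
--             best_length = num_segments
--
--     return best_match
-- ===== SOURCE B (Python) =====
-- from typing import List, Optional
--
-- def _normalize_singular(word: str) -> str:
--     """Naive singular form: strips trailing 's' / 'es'."""
--     w = word.lower()
--     if w.endswith("ies") and len(w) > 3:
--         return w[:-3] + "y"
--     if w.endswith("ses") or w.endswith("xes") or w.endswith("zes"):
--         return w[:-2]
--     if w.endswith("s") and not w.endswith("ss") and len(w) > 2:
--         return w[:-1]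
--     return w
--
-- def _find_multi_word_field(words: List[str], start_idx: int, fields: List[str]) -> Optional[str]:
--     """Longest dotted-field match via a precomputed index of normalized segment tuples."""
--     index = {}
--     for field in fields:
--         if "." in field:
--             key = tuple(_normalize_singular(s) for s in field.lower().split("."))
--             if key not in index:
--                 index[key] = field
--     max_len = max((len(key) for key in index), default=0)
--     for length in range(min(len(words) - start_idx, max_len), 0, -1):
--         key = tuple(_normalize_singular(w) for w in words[start_idx:start_idx + length])
--         if key in index:
--             return index[key]
--     return None
-- ===== Notes on version B (the rewrite author's own statement) =====
-- stated objective: idiomatic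
-- what changed: Replaces A's best-tracking scan (slice and compare per field) with a dict indexing each dotted field by its normalized segment tuple (first field per key kept), then a single longest-window-first lookup over descending window lengths.
-- outside the precondition, e.g. on _find_multi_word_field(['city'], -2, ['address.city']): A returns 'address.city', B returns None
import Mathlib
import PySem

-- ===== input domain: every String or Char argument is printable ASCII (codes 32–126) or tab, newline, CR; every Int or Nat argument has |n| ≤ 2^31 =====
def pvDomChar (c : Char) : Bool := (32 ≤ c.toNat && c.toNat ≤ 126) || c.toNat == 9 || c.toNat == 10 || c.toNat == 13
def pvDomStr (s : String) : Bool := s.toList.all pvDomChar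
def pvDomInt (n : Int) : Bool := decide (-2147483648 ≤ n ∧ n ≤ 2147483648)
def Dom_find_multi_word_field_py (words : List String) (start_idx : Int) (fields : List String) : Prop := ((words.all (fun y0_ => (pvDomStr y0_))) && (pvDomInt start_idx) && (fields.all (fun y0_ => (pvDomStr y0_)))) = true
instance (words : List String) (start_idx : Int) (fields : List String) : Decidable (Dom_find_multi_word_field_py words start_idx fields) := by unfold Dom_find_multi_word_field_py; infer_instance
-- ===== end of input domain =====

-- B replaces A's best-tracking scan with a normalized-key index plus a longest-window-first
-- lookup (idiomatic restructuring, same results for word indices 0 ≤ start_idx).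


-- ===== PORT A =====
-- port of _normalize_singular (shared helper of both Pythons, ported once)
def normalize_singular_py (word : String) : String :=
  let w := PySem.Str.lower word
  if PySem.Str.endswith w "ies" && decide (3 < PySem.Str.len w) then
    PySem.Str.slice w none (some (-3)) ++ "y"
  else if PySem.Str.endswith w "ses" || PySem.Str.endswith w "xes" || PySem.Str.endswith w "zes" then
    PySem.Str.slice w none (some (-2))
  else if PySem.Str.endswith w "s" && !(PySem.Str.endswith w "ss") && decide (2 < PySem.Str.len w) then
    PySem.Str.slice w none (some (-1))
  else w

def find_multi_word_field_py (words : List String) (start_idx : Int) (fields : List String) : Option String :=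
  let st := fields.foldl (fun (st : Option String × Int) field =>
    let best_match := st.1
    let best_length := st.2
    if !(PySem.Str.isIn "." field) then st
    else
      let segments := (PySem.Str.split? (PySem.Str.lower field) ".").getD []
      let num_segments : Int := (segments.length : Int)
      if start_idx + num_segments > (words.length : Int) then st
      else if num_segments ≤ best_length then st
      else
        let candidate := PySem.List.slice words (some start_idx) (some (start_idx + num_segments))
        if candidate = segments then (some field, num_segments)
        else if (candidate.zip segments).all
            (fun p => normalize_singular_py p.1 == normalize_singular_py p.2) then
          (some field, num_segments)
        else (best_match, best_length)) (none, 0)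
  st.1

-- ===== PORT B =====
def find_multi_word_field_py_alt (words : List String) (start_idx : Int) (fields : List String) : Option String :=
  let index : PySem.Dict (List String) String := fields.foldl (fun d field =>
    if PySem.Str.isIn "." field then
      let key := ((PySem.Str.split? (PySem.Str.lower field) ".").getD []).map normalize_singular_py
      if !(d.contains key) then d.insert key field else d
    else d) PySem.Dict.empty
  let max_len : Int := (index.keys.map (fun key => (key.length : Int))).foldl max 0
  (PySem.List.pyRange (min ((words.length : Int) - start_idx) max_len) 0 (-1)).findSome? (fun len =>
    index.get? ((PySem.List.slice words (some start_idx) (some (start_idx + len))).map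
      normalize_singular_py))

-- ===== PRECONDITION & SPEC =====
-- Pre_ restricts to the natural domain 0 ≤ start_idx (a word index): for negative start_idx
-- A still returns, but Python's negative-slice wraparound shortens the window and the
-- truncated zip lets it "match" vacuously — outside the function's intended use.
def Pre_find_multi_word_field_py (words : List String) (start_idx : Int) (fields : List String) : Prop := 0 ≤ start_idx
instance (words : List String) (start_idx : Int) (fields : List String) : Decidable (Pre_find_multi_word_field_py words start_idx fields) := by unfold Pre_find_multi_word_field_py; infer_instance

def pvWitness_find_multi_word_field_py : List String × Int × List String := (["address", "city"], 0, ["address.city", "name"])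

def Spec_find_multi_word_field_py (words : List String) (start_idx : Int) (fields : List String) (out : Option String) : Prop := out = find_multi_word_field_py_alt words start_idx fields
instance (words : List String) (start_idx : Int) (fields : List String) (out : Option String) : Decidable (Spec_find_multi_word_field_py words start_idx fields out) := by unfold Spec_find_multi_word_field_py; infer_instance

-- ===== CLAIM (what is proved, stated in full; the proofs are below) =====
def Claim_equal_find_multi_word_field_py : Prop := ∀ (words : List String) (start_idx : Int) (fields : List String), Dom_find_multi_word_field_py words start_idx fields → Pre_find_multi_word_field_py words start_idx fields → Spec_find_multi_word_field_py words start_idx fields (find_multi_word_field_py words start_idx fields)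

-- ===== LEMMAS AND PROOFS =====

-- Proof-only abbreviations: the normalized window, a field's segments/key/length, and the
-- effective match predicate Q shared by both characterizations.
def pvSegs (f : String) : List String := (PySem.Str.split? (PySem.Str.lower f) ".").getD []
def pvKey (f : String) : List String := (pvSegs f).map normalize_singular_py
def pvLn (f : String) : Int := ((pvSegs f).length : Int)
def pvWin (words : List String) (s L : Int) : List String :=
  (PySem.List.slice words (some s) (some (s + L))).map normalize_singular_py
def pvQ (words : List String) (s : Int) (f : String) : Bool :=
  PySem.Str.isIn "." f && decide (s + pvLn f ≤ (words.length : Int))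
    && (pvWin words s (pvLn f) == pvKey f)

-- A's loop, rephrased: the first field beating the running best length, recursively.
def pvPick (words : List String) (s : Int) : Int → List String → Option (String × Int)
  | _, [] => none
  | bl, f :: rest =>
      if pvQ words s f && decide (bl < pvLn f) then
        some ((pvPick words s (pvLn f) rest).getD (f, pvLn f))
      else pvPick words s bl rest

-- max of the qualifying lengths strictly above bl
def pvM (words : List String) (s bl : Int) (fields : List String) : Option Int :=
  (((fields.filter (pvQ words s)).map pvLn).filter (fun x => bl < x)).max?

theorem pvWin_length (words : List String) (s L : Int) (hs : 0 ≤ s) (hL : 0 ≤ L)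
    (hle : s + L ≤ (words.length : Int)) : ((pvWin words s L).length : Int) = L := by
  unfold pvWin
  rw [PySem.List.slice_toNat _ hs (by omega)]
  simp [List.length_take, List.length_drop]
  omega

theorem pvZipAll_iff (xs ys : List String) (h : xs.length = ys.length) :
    ((xs.zip ys).all (fun p => normalize_singular_py p.1 == normalize_singular_py p.2) = true)
      ↔ xs.map normalize_singular_py = ys.map normalize_singular_py := by
  induction xs generalizing ys with
  | nil => cases ys with
    | nil => simp
    | cons y ys => simp at h
  | cons x xs ih => cases ys with
    | nil => simp at h
    | cons y ys =>
      simp only [List.zip_cons_cons, List.all_cons, List.map_cons, List.cons.injEq,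
        Bool.and_eq_true, beq_iff_eq]
      rw [ih ys (by simpa using h)]

theorem pvFoldA_eq_pick (words : List String) (s : Int) (hs : 0 ≤ s) :
    ∀ (fields : List String) (bm : Option String) (bl : Int),
    List.foldl (fun (st : Option String × Int) field =>
      if (!PySem.Str.isIn "." field) = true then st
      else if s + (((PySem.Str.split? (PySem.Str.lower field) ".").getD []).length : Int)
          > (words.length : Int) then st
      else if (((PySem.Str.split? (PySem.Str.lower field) ".").getD []).length : Int) ≤ st.2 then st
      else if PySem.List.slice words (some s)
            (some (s + (((PySem.Str.split? (PySem.Str.lower field) ".").getD []).length : Int)))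
          = (PySem.Str.split? (PySem.Str.lower field) ".").getD [] then
        (some field, (((PySem.Str.split? (PySem.Str.lower field) ".").getD []).length : Int))
      else if ((PySem.List.slice words (some s)
              (some (s + (((PySem.Str.split? (PySem.Str.lower field) ".").getD []).length : Int)))).zip
            ((PySem.Str.split? (PySem.Str.lower field) ".").getD [])).all
          (fun p => normalize_singular_py p.1 == normalize_singular_py p.2) then
        (some field, (((PySem.Str.split? (PySem.Str.lower field) ".").getD []).length : Int))
      else (st.1, st.2)) (bm, bl) fields
      = (match pvPick words s bl fields with
         | some (f, l) => (some f, l)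
         | none => (bm, bl)) := by
  intro fields
  induction fields with
  | nil => intro bm bl; simp [pvPick]
  | cons f rest ih =>
    intro bm bl
    rw [List.foldl_cons, pvPick]
    have hpveq : (((PySem.Str.split? (PySem.Str.lower f) ".").getD []).length : Int) = pvLn f := rfl
    by_cases h1 : PySem.Str.isIn "." f = true
    · by_cases h2 : s + pvLn f > (words.length : Int)
      · have hq : pvQ words s f = false := by
          unfold pvQ
          simp [h2]
        simp only [h1, Bool.not_true, Bool.false_eq_true, if_false,
          if_pos (by omega : s + (((PySem.Str.split? (PySem.Str.lower f) ".").getD []).length : Int) > (words.length : Int)),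
          hq, Bool.false_and, Bool.false_eq_true]
        exact ih bm bl
      · push_neg at h2
        have hln0 : (0:Int) ≤ pvLn f := by unfold pvLn; positivity
        have hlen : (PySem.List.slice words (some s) (some (s + pvLn f))).length
            = (pvSegs f).length := by
          have hw := pvWin_length words s (pvLn f) hs hln0 h2
          unfold pvWin at hw
          rw [List.length_map] at hw
          have hpveq2 : pvLn f = ((pvSegs f).length : Int) := rfl
          omega
        have hzip := pvZipAll_iff (PySem.List.slice words (some s) (some (s + pvLn f)))
          (pvSegs f) hlen
        have hif2 : ¬ (s + (((PySem.Str.split? (PySem.Str.lower f) ".").getD []).length : Int)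
            > (words.length : Int)) := by omega
        by_cases h3 : pvLn f ≤ bl
        · have hpickc : (pvQ words s f && decide (bl < pvLn f)) = false := by
            cases hpv : pvQ words s f
            · simp
            · simp; omega
          rw [hpickc]
          simp only [h1, Bool.not_true, Bool.false_eq_true, if_false, if_neg hif2,
            if_pos (by omega : (((PySem.Str.split? (PySem.Str.lower f) ".").getD []).length : Int) ≤ bl)]
          exact ih bm bl
        · push_neg at h3
          have hif3 : ¬ ((((PySem.Str.split? (PySem.Str.lower f) ".").getD []).length : Int) ≤ bl) := by omega
          have hif2' : ¬ (s + pvLn f > (words.length : Int)) := by omega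
          have hif3' : ¬ (pvLn f ≤ bl) := by omega
          have hwinkey : (pvWin words s (pvLn f) = pvKey f)
              ↔ ((PySem.List.slice words (some s) (some (s + pvLn f))).map normalize_singular_py
                  = (pvSegs f).map normalize_singular_py) := Iff.rfl
          by_cases hm : pvWin words s (pvLn f) = pvKey f
          · have hq : pvQ words s f = true := by
              unfold pvQ
              rw [h1]
              simp [hm, h2]
            have hpickc : (pvQ words s f && decide (bl < pvLn f)) = true := by
              simp [hq, h3]
            rw [hpickc]
            simp only [if_true]
            have hz : ((PySem.List.slice words (some s) (some (s + pvLn f))).zip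
                ((PySem.Str.split? (PySem.Str.lower f) ".").getD [])).all
                (fun p => normalize_singular_py p.1 == normalize_singular_py p.2) = true :=
              hzip.mpr (hwinkey.mp hm)
            by_cases hcand : PySem.List.slice words (some s) (some (s + pvLn f))
                = (PySem.Str.split? (PySem.Str.lower f) ".").getD []
            · simp only [h1, Bool.not_true, Bool.false_eq_true, if_false, if_neg hif2,
                if_neg hif3, if_neg hif2', if_neg hif3', if_pos hcand, hpveq]
              rw [ih (some f) (pvLn f)]
              cases hp : pvPick words s (pvLn f) rest with
              | none => simp [hp]
              | some p => simp [hp]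
            · simp only [h1, Bool.not_true, Bool.false_eq_true, if_false, if_neg hif2,
                if_neg hif3, if_neg hif2', if_neg hif3', if_neg hcand, hz, if_true, hpveq]
              rw [ih (some f) (pvLn f)]
              cases hp : pvPick words s (pvLn f) rest with
              | none => simp [hp]
              | some p => simp [hp]
          · have hq : pvQ words s f = false := by
              unfold pvQ
              simp [hm]
            have hpickc : (pvQ words s f && decide (bl < pvLn f)) = false := by simp [hq]
            rw [hpickc]
            simp only [Bool.false_eq_true, if_false]
            have hcand : ¬ (PySem.List.slice words (some s) (some (s + pvLn f))
                = (PySem.Str.split? (PySem.Str.lower f) ".").getD []) := by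
              intro hc
              exact hm (hwinkey.mpr (by rw [show pvSegs f = (PySem.Str.split? (PySem.Str.lower f) ".").getD [] from rfl, hc]))
            have hz : ((PySem.List.slice words (some s) (some (s + pvLn f))).zip
                ((PySem.Str.split? (PySem.Str.lower f) ".").getD [])).all
                (fun p => normalize_singular_py p.1 == normalize_singular_py p.2) = false := by
              rw [Bool.eq_false_iff]
              intro hzt
              exact hm (hwinkey.mpr (hzip.mp hzt))
            simp only [h1, Bool.not_true, Bool.false_eq_true, if_false, if_neg hif2,
              if_neg hif3, if_neg hif2', if_neg hif3', if_neg hcand, hz, if_false, hpveq]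
            exact ih bm bl
    · simp only [Bool.not_eq_true] at h1
      have hq : pvQ words s f = false := by
        unfold pvQ
        rw [h1]
        simp
      have hpickc : (pvQ words s f && decide (bl < pvLn f)) = false := by simp [hq]
      rw [hpickc]
      simp only [h1, Bool.not_false, if_true, Bool.false_eq_true, if_false]
      exact ih bm bl

theorem pvPick_none (words : List String) (s : Int) :
    ∀ (fields : List String) (bl : Int),
    (∀ g ∈ fields, pvQ words s g = true → pvLn g ≤ bl) →
    pvPick words s bl fields = none := by
  intro fields
  induction fields with
  | nil => intro bl h; simp [pvPick]
  | cons f rest ih =>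
    intro bl h
    rw [pvPick]
    have hc : (pvQ words s f && decide (bl < pvLn f)) = false := by
      by_cases hq : pvQ words s f = true
      · have := h f (by simp) hq
        simp [hq]; omega
      · simp [Bool.not_eq_true] at hq; simp [hq]
    rw [hc]
    simp only [Bool.false_eq_true, if_false]
    exact ih bl (fun g hg => h g (by simp [hg]))

theorem pvPick_max (words : List String) (s m : Int) :
    ∀ (fields : List String) (bl : Int), bl < m →
    (∀ g ∈ fields, pvQ words s g = true → pvLn g ≤ m) →
    (∃ g ∈ fields, pvQ words s g = true ∧ pvLn g = m) →
    pvPick words s bl fields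
      = (fields.find? (fun f => pvQ words s f && (pvLn f == m))).map (·, m) := by
  intro fields
  induction fields with
  | nil => rintro bl _ _ ⟨g, hg, _⟩; simp at hg
  | cons f rest ih =>
    intro bl hblm hle hex
    by_cases hq : pvQ words s f = true
    · by_cases hfm : pvLn f = m
      · rw [pvPick]
        have hc : (pvQ words s f && decide (bl < pvLn f)) = true := by
          simp [hq]; omega
        rw [hc]
        simp only [if_true]
        rw [pvPick_none words s rest (pvLn f)
          (fun g hg hgq => by rw [hfm]; exact hle g (by simp [hg]) hgq)]
        rw [List.find?_cons_of_pos (by simp [hq, hfm])]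
        simp [hfm]
      · have hlt : pvLn f < m := lt_of_le_of_ne (hle f (by simp) hq) hfm
        have hle' : ∀ g ∈ rest, pvQ words s g = true → pvLn g ≤ m :=
          fun g hg hgq => hle g (by simp [hg]) hgq
        have hex' : ∃ g ∈ rest, pvQ words s g = true ∧ pvLn g = m := by
          obtain ⟨g, hg, h1, h2⟩ := hex
          rcases List.mem_cons.mp hg with rfl | hgr
          · exact absurd h2 hfm
          · exact ⟨g, hgr, h1, h2⟩
        have hhead : (pvQ words s f && (pvLn f == m)) = false := by simp [hfm]
        rw [List.find?_cons_of_neg (by simp [hhead])]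
        by_cases hbl : bl < pvLn f
        · rw [pvPick]
          have hc : (pvQ words s f && decide (bl < pvLn f)) = true := by simp [hq, hbl]
          rw [hc]
          simp only [if_true]
          rw [ih (pvLn f) hlt hle' hex']
          have hsome : (rest.find? (fun f => pvQ words s f && (pvLn f == m))).isSome = true := by
            apply List.find?_isSome.mpr
            obtain ⟨g, hg, h1, h2⟩ := hex'
            exact ⟨g, hg, by simp [h1, h2]⟩
          obtain ⟨f', hf'⟩ := Option.isSome_iff_exists.mp hsome
          rw [hf']
          simp
        · rw [pvPick]
          have hc : (pvQ words s f && decide (bl < pvLn f)) = false := by simp [hbl]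
          rw [hc]
          simp only [Bool.false_eq_true, if_false]
          exact ih bl hblm hle' hex'
    · simp only [Bool.not_eq_true] at hq
      have hex' : ∃ g ∈ rest, pvQ words s g = true ∧ pvLn g = m := by
        obtain ⟨g, hg, h1, h2⟩ := hex
        rcases List.mem_cons.mp hg with rfl | hgr
        · rw [hq] at h1; simp at h1
        · exact ⟨g, hgr, h1, h2⟩
      rw [pvPick]
      have hc : (pvQ words s f && decide (bl < pvLn f)) = false := by simp [hq]
      rw [hc]
      simp only [Bool.false_eq_true, if_false]
      rw [List.find?_cons_of_neg (by simp [hq])]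
      exact ih bl hblm (fun g hg hgq => hle g (by simp [hg]) hgq) hex'

theorem pvPick_eq_M (words : List String) (s : Int) (fields : List String) :
    pvPick words s 0 fields
      = (pvM words s 0 fields).bind
          (fun m => (fields.find? (fun f => pvQ words s f && (pvLn f == m))).map (·, m)) := by
  unfold pvM
  cases hmax : (((fields.filter (pvQ words s)).map pvLn).filter (fun x => (0:Int) < x)).max? with
  | none =>
    have hnil := List.max?_eq_none_iff.mp hmax
    have hall : ∀ g ∈ fields, pvQ words s g = true → pvLn g ≤ 0 := by
      intro g hg hgq
      by_contra hpos
      have : pvLn g ∈ (((fields.filter (pvQ words s)).map pvLn).filter (fun x => (0:Int) < x)) := by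
        refine List.mem_filter.mpr ⟨List.mem_map.mpr ⟨g, List.mem_filter.mpr ⟨hg, hgq⟩, rfl⟩, ?_⟩
        simpa using by omega
      rw [hnil] at this
      simp at this
    rw [pvPick_none words s fields 0 hall]
    simp
  | some m =>
    obtain ⟨hmem, hub⟩ := List.max?_eq_some_iff.mp hmax
    obtain ⟨hmem', hmpos⟩ := List.mem_filter.mp hmem
    obtain ⟨g0, hg0, hg0m⟩ := List.mem_map.mp hmem'
    obtain ⟨hg0f, hg0q⟩ := List.mem_filter.mp hg0
    have hmpos' : (0:Int) < m := by simpa using hmpos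
    have hle : ∀ g ∈ fields, pvQ words s g = true → pvLn g ≤ m := by
      intro g hg hgq
      by_cases hp : (0:Int) < pvLn g
      · exact hub _ (List.mem_filter.mpr
          ⟨List.mem_map.mpr ⟨g, List.mem_filter.mpr ⟨hg, hgq⟩, rfl⟩, by simpa using hp⟩)
      · omega
    rw [pvPick_max words s m fields 0 hmpos' hle ⟨g0, hg0f, hg0q, hg0m⟩]
    simp

theorem pvIndex_get? (k : List String) :
    ∀ (fields : List String) (d : PySem.Dict (List String) String),
    (fields.foldl (fun d field =>
      if PySem.Str.isIn "." field then
        if !(d.contains (((PySem.Str.split? (PySem.Str.lower field) ".").getD []).map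
            normalize_singular_py)) then
          d.insert (((PySem.Str.split? (PySem.Str.lower field) ".").getD []).map
            normalize_singular_py) field
        else d
      else d) d).get? k
    = (d.get? k).or (fields.find? (fun f => PySem.Str.isIn "." f && (pvKey f == k))) := by
  intro fields
  induction fields with
  | nil => intro d; simp
  | cons f rest ih =>
    intro d
    rw [List.foldl_cons]
    by_cases h1 : PySem.Str.isIn "." f = true
    · by_cases hk : pvKey f = k
      · have hfind : List.find? (fun f => PySem.Str.isIn "." f && (pvKey f == k)) (f :: rest)
            = some f := by
          apply List.find?_cons_of_pos
          show (PySem.Str.isIn "." f && (pvKey f == k)) = true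
          rw [h1, hk]
          simp
        rw [hfind]
        by_cases h2 : d.contains (((PySem.Str.split? (PySem.Str.lower f) ".").getD []).map
            normalize_singular_py) = true
        · have hsome : (d.get? k).isSome = true := by
            rw [← hk]
            rw [← PySem.Dict.contains_eq_isSome_get?]
            exact h2
          obtain ⟨v, hv⟩ := Option.isSome_iff_exists.mp hsome
          simp only [h1, if_true, h2, Bool.not_true, Bool.false_eq_true, if_false]
          rw [ih d, hv]
          simp
        · have hnone : d.get? k = none := by
            rw [← hk]
            cases hg : d.get? (pvKey f) with
            | none => rfl
            | some v =>
              exfalso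
              apply h2
              rw [PySem.Dict.contains_eq_isSome_get?]
              show (d.get? (((PySem.Str.split? (PySem.Str.lower f) ".").getD []).map
                normalize_singular_py)).isSome = true
              rw [show (((PySem.Str.split? (PySem.Str.lower f) ".").getD []).map
                normalize_singular_py) = pvKey f from rfl, hg]
              rfl
          simp only [h1, if_true, Bool.not_eq_true] at h2 ⊢
          simp only [h2, Bool.not_false, if_true]
          rw [ih]
          rw [PySem.Dict.get?_insert]
          rw [show (((PySem.Str.split? (PySem.Str.lower f) ".").getD []).map
            normalize_singular_py) = pvKey f from rfl]
          rw [if_pos hk.symm, hnone]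
          simp
      · have hfind : List.find? (fun f => PySem.Str.isIn "." f && (pvKey f == k)) (f :: rest)
            = List.find? (fun f => PySem.Str.isIn "." f && (pvKey f == k)) rest := by
          apply List.find?_cons_of_neg
          show ¬ (PySem.Str.isIn "." f && (pvKey f == k)) = true
          simp [hk]
        rw [hfind]
        by_cases h2 : d.contains (((PySem.Str.split? (PySem.Str.lower f) ".").getD []).map
            normalize_singular_py) = true
        · simp only [h1, if_true, h2, Bool.not_true, Bool.false_eq_true, if_false]
          exact ih d
        · simp only [h1, if_true, Bool.not_eq_true] at h2 ⊢
          simp only [h2, Bool.not_false, if_true]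
          rw [ih]
          rw [PySem.Dict.get?_insert]
          rw [show (((PySem.Str.split? (PySem.Str.lower f) ".").getD []).map
            normalize_singular_py) = pvKey f from rfl]
          rw [if_neg (fun h => hk h.symm)]
    · simp only [Bool.not_eq_true] at h1
      have hfind : List.find? (fun f => PySem.Str.isIn "." f && (pvKey f == k)) (f :: rest)
          = List.find? (fun f => PySem.Str.isIn "." f && (pvKey f == k)) rest := by
        apply List.find?_cons_of_neg
        show ¬ (PySem.Str.isIn "." f && (pvKey f == k)) = true
        rw [h1]
        simp
      rw [hfind]
      simp only [h1, Bool.false_eq_true, if_false]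
      exact ih d

theorem pvScan_eq_M (words : List String) (s : Int) (fields : List String) (hs : 0 ≤ s) :
    ∀ (k : Nat),
    (∀ g ∈ fields, pvQ words s g = true → pvLn g ≤ (k : Int)) →
    (PySem.List.pyRange (k : Int) 0 (-1)).findSome?
        (fun L => fields.find? (fun f => pvQ words s f && (pvLn f == L)))
      = (pvM words s 0 fields).bind
          (fun m => fields.find? (fun f => pvQ words s f && (pvLn f == m))) := by
  intro k
  induction k with
  | zero =>
    intro h0
    rw [PySem.List.pyRange_neg_one_eq_nil (by simp)]
    have hnil : (((fields.filter (pvQ words s)).map pvLn).filter (fun x => (0:Int) < x)) = [] := by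
      apply List.filter_eq_nil_iff.mpr
      intro x hx
      obtain ⟨g, hg, rfl⟩ := List.mem_map.mp hx
      obtain ⟨hgf, hgq⟩ := List.mem_filter.mp hg
      have := h0 g hgf hgq
      simp only [Nat.cast_zero] at this
      simp
      omega
    unfold pvM
    rw [hnil]
    simp
  | succ k ih =>
    intro h0
    rw [PySem.List.pyRange_neg_one_cons (by exact_mod_cast Nat.succ_pos k)]
    rw [List.findSome?_cons]
    cases hf : fields.find? (fun f => pvQ words s f && (pvLn f == ((k+1 : Nat) : Int))) with
    | some f =>
      have hpred := List.find?_some hf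
      simp only [Bool.and_eq_true, beq_iff_eq] at hpred
      obtain ⟨hq, hl⟩ := hpred
      have hmem := List.mem_of_find?_eq_some hf
      have hmax : pvM words s 0 fields = some ((k+1 : Nat) : Int) := by
        unfold pvM
        apply List.max?_eq_some_iff.mpr
        constructor
        · apply List.mem_filter.mpr
          constructor
          · exact List.mem_map.mpr ⟨f, List.mem_filter.mpr ⟨hmem, hq⟩, hl⟩
          · simp
        · intro b hb
          obtain ⟨hb1, _⟩ := List.mem_filter.mp hb
          obtain ⟨g, hg, rfl⟩ := List.mem_map.mp hb1
          obtain ⟨hgf, hgq⟩ := List.mem_filter.mp hg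
          exact h0 g hgf hgq
      rw [hmax]
      simp only [Option.bind_some]
      rw [hf]
    | none =>
      have hbound : ∀ g ∈ fields, pvQ words s g = true → pvLn g ≤ (k : Int) := by
        intro g hg hgq
        have hne := List.find?_eq_none.mp hf g hg
        simp only [Bool.and_eq_true, beq_iff_eq, not_and] at hne
        have := h0 g hg hgq
        have hne' := hne hgq
        push_cast at this ⊢
        omega
      have heq : ((k+1 : Nat) : Int) - 1 = (k : Int) := by push_cast; ring
      rw [heq]
      exact ih hbound

theorem pvFindSome?_congr {α β : Type} (l : List α) (f g : α → Option β)
    (h : ∀ x ∈ l, f x = g x) : l.findSome? f = l.findSome? g := by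
  induction l with
  | nil => rfl
  | cons a l ih =>
    rw [List.findSome?_cons, List.findSome?_cons, h a (by simp)]
    cases g a with
    | some b => rfl
    | none => exact ih (fun x hx => h x (by simp [hx]))

theorem pvFindAt_congr (words : List String) (s : Int) (hs : 0 ≤ s) (L : Int) (hL : 0 < L)
    (hle : s + L ≤ (words.length : Int)) (fields : List String) :
    fields.find? (fun f => PySem.Str.isIn "." f &&
        (pvKey f == (PySem.List.slice words (some s) (some (s + L))).map normalize_singular_py))
      = fields.find? (fun f => pvQ words s f && (pvLn f == L)) := by
  have hwin : (((PySem.List.slice words (some s) (some (s + L))).map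
      normalize_singular_py).length : Int) = L := by
    have := pvWin_length words s L hs (le_of_lt hL) hle
    unfold pvWin at this
    exact this
  congr 1
  funext f
  rw [Bool.eq_iff_iff]
  simp only [Bool.and_eq_true, beq_iff_eq]
  constructor
  · rintro ⟨hin, hkey⟩
    have hkl : ((pvKey f).length : Int) = pvLn f := by
      unfold pvKey pvLn
      rw [List.length_map]
    have hlen : pvLn f = L := by
      rw [hkey, hwin] at hkl
      omega
    refine ⟨?_, hlen⟩
    unfold pvQ
    rw [hin]
    simp only [Bool.true_and, Bool.and_eq_true, decide_eq_true_eq, beq_iff_eq]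
    refine ⟨by omega, ?_⟩
    show pvWin words s (pvLn f) = pvKey f
    rw [hlen]
    exact hkey.symm
  · rintro ⟨hq, hlen⟩
    unfold pvQ at hq
    simp only [Bool.and_eq_true, decide_eq_true_eq, beq_iff_eq] at hq
    obtain ⟨⟨hin, _⟩, hwk⟩ := hq
    refine ⟨hin, ?_⟩
    rw [← hlen]
    exact hwk.symm

theorem pvIndex_keys_mono (k : List String) :
    ∀ (fields : List String) (d : PySem.Dict (List String) String), k ∈ d.keys →
    k ∈ (fields.foldl (fun d field =>
      if PySem.Str.isIn "." field then
        if !(d.contains (((PySem.Str.split? (PySem.Str.lower field) ".").getD []).map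
            normalize_singular_py)) then
          d.insert (((PySem.Str.split? (PySem.Str.lower field) ".").getD []).map
            normalize_singular_py) field
        else d
      else d) d).keys := by
  intro fields
  induction fields with
  | nil => intro d h; exact h
  | cons f rest ih =>
    intro d h
    rw [List.foldl_cons]
    by_cases h1 : PySem.Str.isIn "." f = true
    · by_cases h2 : d.contains (((PySem.Str.split? (PySem.Str.lower f) ".").getD []).map
          normalize_singular_py) = true
      · simp only [h1, if_true, h2, Bool.not_true, Bool.false_eq_true, if_false]
        exact ih d h
      · simp only [h1, if_true, Bool.not_eq_true] at h2 ⊢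
        simp only [h2, Bool.not_false, if_true]
        exact ih _ ((PySem.Dict.mem_keys_insert _ _ _ _).mpr (Or.inr h))
    · simp only [Bool.not_eq_true] at h1
      simp only [h1, Bool.false_eq_true, if_false]
      exact ih d h

theorem pvIndex_keys_mem :
    ∀ (fields : List String) (d : PySem.Dict (List String) String) (g : String), g ∈ fields →
    PySem.Str.isIn "." g = true →
    pvKey g ∈ (fields.foldl (fun d field =>
      if PySem.Str.isIn "." field then
        if !(d.contains (((PySem.Str.split? (PySem.Str.lower field) ".").getD []).map
            normalize_singular_py)) then
          d.insert (((PySem.Str.split? (PySem.Str.lower field) ".").getD []).map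
            normalize_singular_py) field
        else d
      else d) d).keys := by
  intro fields
  induction fields with
  | nil => intro d g hg; simp at hg
  | cons f rest ih =>
    intro d g hg hgin
    rw [List.foldl_cons]
    rcases List.mem_cons.mp hg with rfl | hgr
    · by_cases h2 : d.contains (((PySem.Str.split? (PySem.Str.lower g) ".").getD []).map
          normalize_singular_py) = true
      · simp only [hgin, if_true, h2, Bool.not_true, Bool.false_eq_true, if_false]
        apply pvIndex_keys_mono
        exact (PySem.Dict.contains_iff_mem_keys _ _).mp h2
      · simp only [hgin, if_true, Bool.not_eq_true] at h2 ⊢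
        simp only [h2, Bool.not_false, if_true]
        apply pvIndex_keys_mono
        exact (PySem.Dict.mem_keys_insert _ _ _ _).mpr (Or.inl rfl)
    · by_cases h1 : PySem.Str.isIn "." f = true
      · by_cases h2 : d.contains (((PySem.Str.split? (PySem.Str.lower f) ".").getD []).map
            normalize_singular_py) = true
        · simp only [h1, if_true, h2, Bool.not_true, Bool.false_eq_true, if_false]
          exact ih _ g hgr hgin
        · simp only [h1, if_true, Bool.not_eq_true] at h2 ⊢
          simp only [h2, Bool.not_false, if_true]
          exact ih _ g hgr hgin
      · simp only [Bool.not_eq_true] at h1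
        simp only [h1, Bool.false_eq_true, if_false]
        exact ih _ g hgr hgin

theorem pvMaxlen_bound (words : List String) (s : Int) (fields : List String) :
    ∀ g ∈ fields, pvQ words s g = true →
    pvLn g ≤ (((fields.foldl (fun d field =>
      if PySem.Str.isIn "." field then
        if !(d.contains (((PySem.Str.split? (PySem.Str.lower field) ".").getD []).map
            normalize_singular_py)) then
          d.insert (((PySem.Str.split? (PySem.Str.lower field) ".").getD []).map
            normalize_singular_py) field
        else d
      else d) PySem.Dict.empty).keys).map
      (fun key => (key.length : Int))).foldl max 0 := by
  intro g hg hq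
  have hin : PySem.Str.isIn "." g = true := by
    unfold pvQ at hq
    simp only [Bool.and_eq_true] at hq
    exact hq.1.1
  have hmem := pvIndex_keys_mem fields PySem.Dict.empty g hg hin
  have hmem2 : ((pvKey g).length : Int) ∈ (((fields.foldl (fun d field =>
      if PySem.Str.isIn "." field then
        if !(d.contains (((PySem.Str.split? (PySem.Str.lower field) ".").getD []).map
            normalize_singular_py)) then
          d.insert (((PySem.Str.split? (PySem.Str.lower field) ".").getD []).map
            normalize_singular_py) field
        else d
      else d) PySem.Dict.empty).keys).map
      (fun key => (key.length : Int))) := List.mem_map.mpr ⟨pvKey g, hmem, rfl⟩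
  have hub := (PySem.List.le_foldl_max (((fields.foldl (fun d field =>
      if PySem.Str.isIn "." field then
        if !(d.contains (((PySem.Str.split? (PySem.Str.lower field) ".").getD []).map
            normalize_singular_py)) then
          d.insert (((PySem.Str.split? (PySem.Str.lower field) ".").getD []).map
            normalize_singular_py) field
        else d
      else d) PySem.Dict.empty).keys).map
      (fun key => (key.length : Int))) 0).2 _ hmem2
  have hlen : pvLn g = ((pvKey g).length : Int) := by
    unfold pvKey
    rw [List.length_map]
    rfl
  omega

-- ===== VERDICT (by name: the statement is the Claim_ definition above) =====
theorem find_multi_word_field_py_spec : Claim_equal_find_multi_word_field_py := by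
  intro words s fields _hdom hpre
  unfold Pre_find_multi_word_field_py at hpre
  unfold Spec_find_multi_word_field_py
  unfold find_multi_word_field_py find_multi_word_field_py_alt
  simp only []
  rw [pvFoldA_eq_pick words s hpre fields none 0]
  rw [pvPick_eq_M words s fields]
  simp only [pvIndex_get?, PySem.Dict.get?_empty, Option.none_or]
  have hub := pvMaxlen_bound words s fields
  set M : Int := (((fields.foldl (fun d field =>
      if PySem.Str.isIn "." field then
        if !(d.contains (((PySem.Str.split? (PySem.Str.lower field) ".").getD []).map
            normalize_singular_py)) then
          d.insert (((PySem.Str.split? (PySem.Str.lower field) ".").getD []).map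
            normalize_singular_py) field
        else d
      else d) PySem.Dict.empty).keys).map
    (fun key => (key.length : Int))).foldl max 0 with hM
  rw [pvFindSome?_congr _ _ _ (fun L hL => by
    have hmem := (PySem.List.mem_pyRange_neg_one).mp hL
    have h2 := hmem.2
    exact pvFindAt_congr words s hpre L hmem.1 (by omega) fields)]
  by_cases ht : min ((words.length : Int) - s) M ≤ 0
  · rw [PySem.List.pyRange_neg_one_eq_nil ht]
    have hnil : (((fields.filter (pvQ words s)).map pvLn).filter (fun x => (0:Int) < x)) = [] := by
      apply List.filter_eq_nil_iff.mpr
      intro x hx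
      obtain ⟨g, hg, rfl⟩ := List.mem_map.mp hx
      obtain ⟨hgf, hgq⟩ := List.mem_filter.mp hg
      have hu := hub g hgf hgq
      unfold pvQ at hgq
      simp only [Bool.and_eq_true, decide_eq_true_eq] at hgq
      simp
      omega
    unfold pvM
    rw [hnil]
    simp
  · push_neg at ht
    have hcast : min ((words.length : Int) - s) M
        = (((min ((words.length : Int) - s) M).toNat : Nat) : Int) :=
      (Int.toNat_of_nonneg (le_of_lt ht)).symm
    rw [hcast, pvScan_eq_M words s fields hpre _ (by
      intro g hg hgq
      have hu := hub g hg hgq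
      unfold pvQ at hgq
      simp only [Bool.and_eq_true, decide_eq_true_eq] at hgq
      omega)]
    cases hm : pvM words s 0 fields with
    | none => simp [hm]
    | some m =>
      simp only [hm, Option.bind_some]
      cases hfind : fields.find? (fun f => pvQ words s f && (pvLn f == m)) with
      | none => simp [hfind]
      | some f => simp [hfind]
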